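-- pv_equiv track=rewrite | github.com/hko920920/PP-Mark | dct_watermark.py | _zigzag_coords
-- ===== SOURCE A (Python) =====
-- from typing import List, Sequence, Tuple
--
-- Coord = Tuple[int, int]
--
-- def _zigzag_coords(size: int = 8) -> List[Coord]:
--     coords: List[Coord] = []
--     for s in range(0, 2 * size - 1):
--         if s % 2 == 0:
--             r = min(s, size - 1)
--             c = s - r
--             while r >= 0 and c < size:
--                 coords.append((r, c))
--                 r -= 1
--                 c += 1
--         else:
--             c = min(s, size - 1)
--             r = s - c
--             while c >= 0 and r < size:
--                 coords.append((r, c))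
--                 r += 1
--                 c -= 1
--     return coords
-- ===== SOURCE B (Python) =====
-- from typing import List, Sequence, Tuple
--
-- Coord = Tuple[int, int]
--
-- def _zigzag_coords(size: int = 8) -> List[Coord]:
--     # Group cells by diagonal r + c, then emit diagonals in order,
--     # reversing the even ones (which run bottom-left -> top-right).
--     diagonals = {}
--     for r in range(size):
--         for c in range(size):
--             diagonals.setdefault(r + c, []).append((r, c))
--     coords: List[Coord] = []
--     for d in range(2 * size - 1):
--         diag = diagonals.get(d, [])
--         coords.extend(reversed(diag) if d % 2 == 0 else diag)
--     return coords
-- ===== Notes on version B (the rewrite author's own statement) =====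
-- stated objective: alternative
-- what changed: Replaces A's inline diagonal walks (two mutable cursors per while-loop) with a group-by pass that buckets every cell (r,c) into diagonals[r+c] in row-major order, then concatenates the buckets, reversing even-indexed diagonals.
import Mathlib
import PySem

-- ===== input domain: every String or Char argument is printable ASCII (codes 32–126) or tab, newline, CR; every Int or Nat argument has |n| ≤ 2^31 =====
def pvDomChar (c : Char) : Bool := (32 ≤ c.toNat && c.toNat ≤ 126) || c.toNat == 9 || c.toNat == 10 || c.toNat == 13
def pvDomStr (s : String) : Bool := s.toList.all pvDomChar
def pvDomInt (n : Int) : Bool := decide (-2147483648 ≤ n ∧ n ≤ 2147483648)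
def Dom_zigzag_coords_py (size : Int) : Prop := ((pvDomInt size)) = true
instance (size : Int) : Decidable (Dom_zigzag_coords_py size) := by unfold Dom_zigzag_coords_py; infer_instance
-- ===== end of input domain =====

-- B groups cells by diagonal r+c and concatenates the buckets (reversing even ones)
-- instead of A's cursor-walking while-loops; an alternative decomposition, not faster.

-- ===== PORT A =====
-- inner while-loop of the even-diagonal branch: walk up-right (r decreasing, c increasing)
def zzEvenLoop (size r c : Int) : List (Int × Int) :=
  if 0 ≤ r ∧ c < size then (r, c) :: zzEvenLoop size (r - 1) (c + 1)
  else []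
termination_by (r + 1).toNat
decreasing_by omega

-- inner while-loop of the odd-diagonal branch: walk down-left (r increasing, c decreasing)
def zzOddLoop (size r c : Int) : List (Int × Int) :=
  if 0 ≤ c ∧ r < size then (r, c) :: zzOddLoop size (r + 1) (c - 1)
  else []
termination_by (c + 1).toNat
decreasing_by omega

def zigzag_coords_py (size : Int) : List (Int × Int) :=
  (PySem.List.pyRange 0 (2 * size - 1) 1).foldl (fun coords s =>
    if PySem.Int.mod s 2 = 0 then
      coords ++ zzEvenLoop size (min s (size - 1)) (s - min s (size - 1))
    else
      coords ++ zzOddLoop size (s - min s (size - 1)) (min s (size - 1))) []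

-- ===== PORT B =====
def zigzag_coords_py_alt (size : Int) : List (Int × Int) :=
  let diagonals : PySem.Dict Int (List (Int × Int)) :=
    (PySem.List.pyRange 0 size 1).foldl (fun dct r =>
      (PySem.List.pyRange 0 size 1).foldl (fun dct c =>
        dct.modify (r + c) [] (fun l => l ++ [(r, c)])) dct)
      PySem.Dict.empty
  (PySem.List.pyRange 0 (2 * size - 1) 1).foldl (fun coords d =>
    coords ++ (if PySem.Int.mod d 2 = 0 then (diagonals.getD d []).reverse
               else diagonals.getD d [])) []

-- ===== PRECONDITION & SPEC =====
def Spec_zigzag_coords_py (size : Int) (out : List (Int × Int)) : Prop := out = zigzag_coords_py_alt size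
instance (size : Int) (out : List (Int × Int)) : Decidable (Spec_zigzag_coords_py size out) := by unfold Spec_zigzag_coords_py; infer_instance

-- ===== CLAIM (what is proved, stated in full; the proofs are below) =====
def Claim_equal_zigzag_coords_py : Prop := ∀ (size : Int), Dom_zigzag_coords_py size → Spec_zigzag_coords_py size (zigzag_coords_py size)

-- ===== LEMMAS AND PROOFS =====

-- the diagonal d of a size×size matrix, in increasing-r order
def diagOf (size d : Int) : List (Int × Int) :=
  (PySem.List.pyRange (max 0 (d - size + 1)) (min d (size - 1) + 1) 1).map (fun r => (r, d - r))

-- the dict-building step of B, as a function of the appended pair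
def zzStep (dct : PySem.Dict Int (List (Int × Int))) (p : Int × Int) : PySem.Dict Int (List (Int × Int)) :=
  dct.modify (p.1 + p.2) [] (fun l => l ++ [p])

lemma getD_foldl_zzStep (xs : List (Int × Int)) (dct : PySem.Dict Int (List (Int × Int))) (k : Int) :
    (xs.foldl zzStep dct).getD k [] = dct.getD k [] ++ xs.filter (fun p => p.1 + p.2 = k) := by
  induction xs generalizing dct with
  | nil => simp
  | cons p xs ih =>
    rw [List.foldl_cons, ih]
    by_cases h : k = p.1 + p.2
    · subst h
      rw [show zzStep dct p = dct.modify (p.1 + p.2) [] (fun l => l ++ [p]) from rfl,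
        PySem.Dict.getD_modify_self]
      simp
    · rw [show zzStep dct p = dct.modify (p.1 + p.2) [] (fun l => l ++ [p]) from rfl,
        PySem.Dict.getD_modify_of_ne _ _ _ h]
      simp [Ne.symm h]

lemma evenLoop_aux (size s : Int) : ∀ (n : Nat) (r : Int), (r + 1).toNat = n →
    zzEvenLoop size r (s - r) =
      ((PySem.List.pyRange (max 0 (s - size + 1)) (r + 1) 1).map (fun r' => (r', s - r'))).reverse := by
  intro n
  induction n using Nat.strong_induction_on with
  | _ n ih =>
    intro r hn
    rw [zzEvenLoop]
    by_cases h : 0 ≤ r ∧ s - r < size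
    · rw [if_pos h, show s - r + 1 = s - (r - 1) from by ring,
        ih r.toNat (by omega) (r - 1) (by omega),
        PySem.List.pyRange_one_succ_right (show max 0 (s - size + 1) ≤ r from by omega)]
      simp
    · rw [if_neg h, PySem.List.pyRange_one_eq_nil (show r + 1 ≤ max 0 (s - size + 1) from by omega)]
      simp

lemma evenLoop_eq (size s r c : Int) (hc : c = s - r) :
    zzEvenLoop size r c =
      ((PySem.List.pyRange (max 0 (s - size + 1)) (r + 1) 1).map (fun r' => (r', s - r'))).reverse := by
  subst hc; exact evenLoop_aux size s (r + 1).toNat r rfl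

lemma oddLoop_aux (size s : Int) : ∀ (n : Nat) (c : Int), (c + 1).toNat = n →
    zzOddLoop size (s - c) c =
      ((PySem.List.pyRange (max 0 (s - size + 1)) (c + 1) 1).map (fun c' => (s - c', c'))).reverse := by
  intro n
  induction n using Nat.strong_induction_on with
  | _ n ih =>
    intro c hn
    rw [zzOddLoop]
    by_cases h : 0 ≤ c ∧ s - c < size
    · rw [if_pos h, show s - c + 1 = s - (c - 1) from by ring,
        ih c.toNat (by omega) (c - 1) (by omega),
        PySem.List.pyRange_one_succ_right (show max 0 (s - size + 1) ≤ c from by omega)]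
      simp
    · rw [if_neg h, PySem.List.pyRange_one_eq_nil (show c + 1 ≤ max 0 (s - size + 1) from by omega)]
      simp

lemma oddLoop_eq (size s r c : Int) (hr : r = s - c) :
    zzOddLoop size r c =
      ((PySem.List.pyRange (max 0 (s - size + 1)) (c + 1) 1).map (fun c' => (s - c', c'))).reverse := by
  subst hr; exact oddLoop_aux size s (c + 1).toNat c rfl

lemma revmap_eq (s : Int) : ∀ (n : Nat) (a b : Int), b - a = n →
    ((PySem.List.pyRange a b 1).map (fun c => (s - c, c))).reverse =
      (PySem.List.pyRange (s - b + 1) (s - a + 1) 1).map (fun r => (r, s - r)) := by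
  intro n
  induction n with
  | zero =>
    intro a b hab
    rw [PySem.List.pyRange_one_eq_nil (by omega), PySem.List.pyRange_one_eq_nil (by omega)]
    simp
  | succ n ih =>
    intro a b hab
    rw [PySem.List.pyRange_one_cons (show a < b from by omega),
      show s - a + 1 = (s - a) + 1 from rfl,
      PySem.List.pyRange_one_succ_right (show s - b + 1 ≤ s - a from by omega)]
    simp only [List.map_cons, List.reverse_cons, List.map_append]
    rw [ih (a + 1) b (by omega)]
    simp [show s - (a + 1) + 1 = s - a from by ring]

lemma filter_row (size r k : Int) :
    ((PySem.List.pyRange 0 size 1).map (fun c => (r, c))).filter (fun p => p.1 + p.2 = k) =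
      if 0 ≤ k - r ∧ k - r < size then [(r, k - r)] else [] := by
  rw [List.filter_map]
  have h1 : ((PySem.List.pyRange 0 size 1).filter ((fun p : Int × Int => decide (p.1 + p.2 = k)) ∘ (fun c => (r, c))))
      = (PySem.List.pyRange 0 size 1).filter (fun c => c == k - r) := by
    apply List.filter_congr
    intro c _
    have hc : ((r, c).1 + (r, c).2 = k) ↔ (c = k - r) := by constructor <;> (intro; omega)
    simp only [Function.comp_apply, decide_eq_decide.mpr hc]
    rfl
  rw [h1, List.filter_beq]
  by_cases h : 0 ≤ k - r ∧ k - r < size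
  · have hmem : k - r ∈ PySem.List.pyRange 0 size 1 := PySem.List.mem_pyRange_one.mpr (by omega)
    rw [List.count_eq_one_of_mem (PySem.List.nodup_pyRange_one _ _) hmem, if_pos h]
    rfl
  · have hnot : (k - r) ∉ PySem.List.pyRange 0 size 1 := by
      intro hm
      exact h (by have := PySem.List.mem_pyRange_one.mp hm; omega)
    rw [List.count_eq_zero.mpr hnot, if_neg h]
    rfl

lemma filter_rowmajor (size k : Int) :
    (((PySem.List.pyRange 0 size 1).flatMap
        (fun r => (PySem.List.pyRange 0 size 1).map (fun c => (r, c)))).filter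
      (fun p => p.1 + p.2 = k)) = diagOf size k := by
  rw [List.filter_flatMap]
  have h1 : ∀ r ∈ PySem.List.pyRange 0 size 1,
      ((PySem.List.pyRange 0 size 1).map (fun c => (r, c))).filter (fun p => p.1 + p.2 = k) =
        (if 0 ≤ k - r ∧ k - r < size then [(r, k - r)] else []) := fun r _ => filter_row size r k
  rw [List.flatMap_congr h1]
  unfold diagOf
  by_cases hk : 0 ≤ k ∧ k ≤ 2 * size - 2
  · rw [PySem.List.pyRange_one_append 0 (max 0 (k - size + 1)) size (by omega) (by omega),
      PySem.List.pyRange_one_append (max 0 (k - size + 1)) (min k (size - 1) + 1) size (by omega) (by omega)]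
    simp only [List.flatMap_append]
    have hlo : (PySem.List.pyRange 0 (max 0 (k - size + 1)) 1).flatMap
        (fun r => if 0 ≤ k - r ∧ k - r < size then [(r, k - r)] else []) = [] := by
      rw [List.flatMap_eq_nil_iff]
      intro r hr
      have := PySem.List.mem_pyRange_one.mp hr
      rw [if_neg (by omega)]
    have hhi : (PySem.List.pyRange (min k (size - 1) + 1) size 1).flatMap
        (fun r => if 0 ≤ k - r ∧ k - r < size then [(r, k - r)] else []) = [] := by
      rw [List.flatMap_eq_nil_iff]
      intro r hr
      have := PySem.List.mem_pyRange_one.mp hr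
      rw [if_neg (by omega)]
    have hmid : (PySem.List.pyRange (max 0 (k - size + 1)) (min k (size - 1) + 1) 1).flatMap
        (fun r => if 0 ≤ k - r ∧ k - r < size then [(r, k - r)] else []) =
        (PySem.List.pyRange (max 0 (k - size + 1)) (min k (size - 1) + 1) 1).map (fun r => (r, k - r)) := by
      rw [List.flatMap_congr (g := fun r => [(r, k - r)]) ?_, ← List.map_eq_flatMap]
      intro r hr
      have := PySem.List.mem_pyRange_one.mp hr
      rw [if_pos (by omega)]
    rw [hlo, hhi, hmid]
    simp
  · rw [PySem.List.pyRange_one_eq_nil (a := max 0 (k - size + 1)) (by omega)]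
    simp only [List.map_nil]
    rw [List.flatMap_eq_nil_iff]
    intro r hr
    have := PySem.List.mem_pyRange_one.mp hr
    rw [if_neg (by omega)]

lemma dict_getD_eq (size d : Int) :
    (((PySem.List.pyRange 0 size 1).foldl (fun dct r =>
      (PySem.List.pyRange 0 size 1).foldl (fun dct c =>
        dct.modify (r + c) [] (fun l => l ++ [(r, c)])) dct)
      PySem.Dict.empty).getD d []) = diagOf size d := by
  have h1 : (fun (dct : PySem.Dict Int (List (Int × Int))) (r : Int) =>
      (PySem.List.pyRange 0 size 1).foldl (fun dct c =>
        dct.modify (r + c) [] (fun l => l ++ [(r, c)])) dct) =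
      (fun dct r => ((PySem.List.pyRange 0 size 1).map (fun c => (r, c))).foldl zzStep dct) := by
    funext dct r
    rw [List.foldl_map]
    rfl
  rw [h1, ← List.foldl_flatMap, getD_foldl_zzStep, ← filter_rowmajor size d]
  simp

lemma branch_even (size s : Int) :
    zzEvenLoop size (min s (size - 1)) (s - min s (size - 1)) = (diagOf size s).reverse := by
  rw [evenLoop_eq size s (min s (size - 1)) (s - min s (size - 1)) rfl]
  rfl

lemma branch_odd (size s : Int) (h0 : 0 ≤ s) (h1 : s < 2 * size - 1) :
    zzOddLoop size (s - min s (size - 1)) (min s (size - 1)) = diagOf size s := by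
  rw [oddLoop_eq size s (s - min s (size - 1)) (min s (size - 1)) rfl,
    revmap_eq s (min s (size - 1) + 1 - max 0 (s - size + 1)).toNat
      (max 0 (s - size + 1)) (min s (size - 1) + 1) (by omega)]
  unfold diagOf
  congr 2 <;> omega

-- ===== VERDICT (by name: the statement is the Claim_ definition above) =====
theorem zigzag_coords_py_spec : Claim_equal_zigzag_coords_py := by
  intro size _
  unfold Spec_zigzag_coords_py zigzag_coords_py zigzag_coords_py_alt
  simp only []
  have hA : (fun (coords : List (Int × Int)) (s : Int) =>
      if PySem.Int.mod s 2 = 0 then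
        coords ++ zzEvenLoop size (min s (size - 1)) (s - min s (size - 1))
      else
        coords ++ zzOddLoop size (s - min s (size - 1)) (min s (size - 1))) =
      (fun coords s => coords ++
        (if PySem.Int.mod s 2 = 0 then
          zzEvenLoop size (min s (size - 1)) (s - min s (size - 1))
        else
          zzOddLoop size (s - min s (size - 1)) (min s (size - 1)))) := by
    funext coords s
    split <;> rfl
  rw [hA, PySem.List.foldl_append_eq_flatMap, PySem.List.foldl_append_eq_flatMap]
  simp only [List.nil_append]
  apply List.flatMap_congr
  intro s hs
  have hb := PySem.List.mem_pyRange_one.mp hs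
  rw [dict_getD_eq]
  split
  · exact branch_even size s
  · exact branch_odd size s (by omega) (by omega)
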